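-- pv_equiv track=rewrite | github.com/varshinireddyt/Python | Roblox/PilesofBoxexs.py | pilesOfBoxes
-- ===== SOURCE A (Python) =====
-- from collections import Counter
--
-- def pilesOfBoxes(boxesInPiles):
--     cnt = Counter(boxesInPiles)
--     nums = sorted(cnt.keys(), reverse=True)
--     k, ans = 0, 0
--     for x in nums[:-1]:
--         k += cnt[x]
--         ans += k
--     return ans
-- ===== SOURCE B (Python) =====
-- from collections import Counter
--
-- def pilesOfBoxes(boxesInPiles):
--     cnt = Counter(boxesInPiles)
--     nums = sorted(cnt.keys())
--     return sum(i * cnt[x] for i, x in enumerate(nums))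
-- ===== Notes on version B (the rewrite author's own statement) =====
-- stated objective: simpler
-- what changed: Replaces A's descending sort plus running prefix-sum accumulator k over nums[:-1] with an ascending sort and a direct index-weighted sum: each distinct value's ascending rank is its multiplier.
import Mathlib
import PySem

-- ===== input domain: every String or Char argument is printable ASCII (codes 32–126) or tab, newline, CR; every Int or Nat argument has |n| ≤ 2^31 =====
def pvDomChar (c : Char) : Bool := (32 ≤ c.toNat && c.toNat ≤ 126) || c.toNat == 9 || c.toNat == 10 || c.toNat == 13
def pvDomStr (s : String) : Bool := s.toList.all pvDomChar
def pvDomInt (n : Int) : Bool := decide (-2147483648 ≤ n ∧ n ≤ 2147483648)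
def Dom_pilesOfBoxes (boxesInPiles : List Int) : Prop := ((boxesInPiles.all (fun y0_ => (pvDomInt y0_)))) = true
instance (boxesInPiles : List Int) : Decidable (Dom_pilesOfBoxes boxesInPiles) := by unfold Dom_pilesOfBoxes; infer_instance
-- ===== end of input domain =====

-- B replaces A's descending sort + running prefix-sum accumulator with an ascending sort and a direct rank-weighted sum (objective: simpler).


-- ===== PORT A =====
def pilesOfBoxes (boxesInPiles : List Int) : Int :=
  let cnt := PySem.Dict.counter boxesInPiles
  let nums := PySem.List.sorted cnt.keys (fun x => x) true
  ((PySem.List.slice nums none (some (-1))).foldl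
    (fun (p : Int × Int) x => (p.1 + cnt.getD x 0, p.2 + (p.1 + cnt.getD x 0)))
    ((0 : Int), (0 : Int))).2

-- ===== PORT B =====
def pilesOfBoxes_alt (boxesInPiles : List Int) : Int :=
  let cnt := PySem.Dict.counter boxesInPiles
  let nums := PySem.List.sorted cnt.keys (fun x => x) false
  ((PySem.List.enumerate nums 0).map (fun p => p.1 * cnt.getD p.2 0)).sum

-- ===== PRECONDITION & SPEC =====
def Spec_pilesOfBoxes (boxesInPiles : List Int) (out : Int) : Prop := out = pilesOfBoxes_alt boxesInPiles
instance (boxesInPiles : List Int) (out : Int) : Decidable (Spec_pilesOfBoxes boxesInPiles out) := by unfold Spec_pilesOfBoxes; infer_instance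

-- ===== CLAIM (what is proved, stated in full; the proofs are below) =====
def Claim_equal_pilesOfBoxes : Prop := ∀ (boxesInPiles : List Int), Dom_pilesOfBoxes boxesInPiles → Spec_pilesOfBoxes boxesInPiles (pilesOfBoxes boxesInPiles)

-- ===== LEMMAS AND PROOFS =====

-- A's loop body, parameterised by the count function c
def pvStep (c : Int → Int) (p : Int × Int) (x : Int) : Int × Int :=
  (p.1 + c x, p.2 + (p.1 + c x))

-- A's loop result from (0, 0)
def pvT (c : Int → Int) (l : List Int) : Int := (l.foldl (pvStep c) (0, 0)).2

-- total count of a list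
def pvS (c : Int → Int) (l : List Int) : Int := (l.map c).sum

-- B's enumerate sum, with start index s
def pvE (c : Int → Int) (l : List Int) (s : Int) : Int :=
  ((PySem.List.enumerate l s).map (fun p => p.1 * c p.2)).sum

theorem pvT_offset (c : Int → Int) (l : List Int) : ∀ k a : Int,
    (l.foldl (pvStep c) (k, a)).2 = a + l.length * k + pvT c l := by
  induction l with
  | nil => intro k a; simp [pvT]
  | cons x t ih =>
      intro k a
      have h1 := ih (k + c x) (a + (k + c x))
      have h2 := ih (c x) (c x)
      simp only [List.foldl_cons, pvStep, pvT, zero_add] at *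
      rw [h1, h2]
      simp only [List.length_cons]
      push_cast
      ring

theorem pvT_append (c : Int → Int) (l : List Int) (y : Int) :
    pvT c (l ++ [y]) = pvT c l + pvS c l + c y := by
  induction l with
  | nil => simp [pvT, pvS, pvStep]
  | cons x t ih =>
      have h1 : pvT c (x :: (t ++ [y])) = ((t ++ [y]).foldl (pvStep c) (c x, c x)).2 := by
        simp [pvT, pvStep]
      have h2 : pvT c (x :: t) = (t.foldl (pvStep c) (c x, c x)).2 := by
        simp [pvT, pvStep]
      rw [show x :: t ++ [y] = x :: (t ++ [y]) from rfl, h1, pvT_offset, h2, pvT_offset, ih]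
      simp only [pvS, List.map_cons, List.sum_cons, List.length_append, List.length_cons, List.length_nil]
      push_cast
      ring

theorem pvE_shift (c : Int → Int) (l : List Int) : ∀ s : Int,
    pvE c l s = s * pvS c l + pvE c l 0 := by
  induction l with
  | nil => intro s; simp [pvE, pvS, PySem.List.enumerate_nil]
  | cons x t ih =>
      intro s
      simp only [pvE, PySem.List.enumerate_cons, List.map_cons, List.sum_cons, zero_add] at *
      rw [ih (s + 1), ih 1]
      simp [pvS]
      ring

theorem pvT_reverse (c : Int → Int) (l : List Int) :
    pvT c l.reverse = pvE c l 0 + pvS c l := by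
  induction l with
  | nil => simp [pvT, pvE, pvS, PySem.List.enumerate_nil]
  | cons x t ih =>
      rw [List.reverse_cons, pvT_append, ih]
      have hS : pvS c t.reverse = pvS c t := by
        simp [pvS]
      rw [hS]
      have h1 := pvE_shift c t 1
      simp only [pvE] at h1
      simp only [pvE, PySem.List.enumerate_cons, List.map_cons, List.sum_cons, zero_add]
      rw [h1]
      simp [pvS]
      ring

-- the descending sort of a duplicate-free set of keys is the reverse of the ascending one
theorem sorted_rev_keys (xs : List Int) :
    PySem.List.sorted (PySem.Set.ofList xs) (fun x => x) true
      = (PySem.List.sorted (PySem.Set.ofList xs) (fun x => x) false).reverse := by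
  apply PySem.List.sorted_rev_eq_of_perm_of_pairwise_gt
  · exact (List.reverse_perm _).trans (PySem.List.sorted_perm _ _ _)
  · exact (List.pairwise_reverse).2 (PySem.List.sorted_ofList_pairwise_lt xs)

-- ===== VERDICT (by name: the statement is the Claim_ definition above) =====
theorem pilesOfBoxes_spec : Claim_equal_pilesOfBoxes := by
  intro xs _
  unfold Spec_pilesOfBoxes pilesOfBoxes pilesOfBoxes_alt
  simp only [PySem.Dict.keys_counter, PySem.List.slice_to_neg_one]
  set c : Int → Int := fun x => (PySem.Dict.counter xs).getD x 0 with hc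
  rw [sorted_rev_keys]
  set asc := PySem.List.sorted (PySem.Set.ofList xs) (fun x => x) false with hasc
  have hA : (asc.reverse.dropLast.foldl (pvStep c) ((0 : Int), (0 : Int))).2
      = pvT c asc.reverse.dropLast := rfl
  show (asc.reverse.dropLast.foldl (fun (p : Int × Int) x => (p.1 + c x, p.2 + (p.1 + c x)))
          ((0 : Int), (0 : Int))).2
      = ((PySem.List.enumerate asc 0).map (fun p => p.1 * c p.2)).sum
  have hB : ((PySem.List.enumerate asc 0).map (fun p => p.1 * c p.2)).sum = pvE c asc 0 := rfl
  rw [show (fun (p : Int × Int) x => (p.1 + c x, p.2 + (p.1 + c x))) = pvStep c from rfl, hA, hB]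
  cases asc with
  | nil => simp [pvT, pvE, PySem.List.enumerate_nil]
  | cons h t =>
      rw [List.reverse_cons, List.dropLast_concat, pvT_reverse]
      have h1 := pvE_shift c t 1
      simp only [pvE] at h1
      simp only [pvE, PySem.List.enumerate_cons, List.map_cons, List.sum_cons, zero_add]
      rw [h1]
      simp [pvS]
      ring
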